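-- pv_equiv track=rewrite | github.com/gillonlo/INF6805E_Project | graphs.py | gen_meta_meta
-- ===== SOURCE A (Python) =====
-- def gen_meta_meta(varying_parameter,values,exclusion=[],default={}):
--     met={
--         "n_clusters":4,
--         "speed":10,
--         "move_type":1,
--         "p_i_infected":10,
--         "p_p_infected":5,
--         "p_p_i_barrier":75,
--         "t_infectious":250,
--         "t_removed":100
--     }
--     l=[]
--     for x in values:
--         tmp_m = {}
--         for k,v in met.items():
--             if k in exclusion:
--                 continue
--             if k!=varying_parameter:
--                 tmp_m[k]=default.get(k,v)
--             else:
--                 tmp_m[k]=x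
--         l.append(tmp_m)
--     return l
-- ===== SOURCE B (Python) =====
-- def gen_meta_meta(varying_parameter, values, exclusion=[], default={}):
--     met = {
--         "n_clusters": 4,
--         "speed": 10,
--         "move_type": 1,
--         "p_i_infected": 10,
--         "p_p_infected": 5,
--         "p_p_i_barrier": 75,
--         "t_infectious": 250,
--         "t_removed": 100
--     }
--     # resolved template as an ordered list of pairs (defaults applied, exclusions dropped)
--     proto = [(k, default.get(k, v)) for k, v in met.items() if k not in exclusion]
--     keys = [k for k, _ in proto]
--     if varying_parameter in keys:
--         i = keys.index(varying_parameter)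
--         pre, suf = proto[:i], proto[i + 1:]
--         return [dict(pre + [(varying_parameter, x)] + suf) for x in values]
--     return [dict(proto) for _ in values]
-- ===== Notes on version B (the rewrite author's own statement) =====
-- stated objective: alternative
-- what changed: B resolves the template once into an ordered list of (key, value) pairs, locates the varying slot's position a single time, splits the list into prefix/suffix around that slot, and emits each result dict by concatenating prefix + [(varying_parameter, x)] + suffix (or copying the template when the varying key was excluded/unknown), instead of A's per-value key-by-key rebuild with exclusion and default lookups inside a nested loop.
import Mathlib
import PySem

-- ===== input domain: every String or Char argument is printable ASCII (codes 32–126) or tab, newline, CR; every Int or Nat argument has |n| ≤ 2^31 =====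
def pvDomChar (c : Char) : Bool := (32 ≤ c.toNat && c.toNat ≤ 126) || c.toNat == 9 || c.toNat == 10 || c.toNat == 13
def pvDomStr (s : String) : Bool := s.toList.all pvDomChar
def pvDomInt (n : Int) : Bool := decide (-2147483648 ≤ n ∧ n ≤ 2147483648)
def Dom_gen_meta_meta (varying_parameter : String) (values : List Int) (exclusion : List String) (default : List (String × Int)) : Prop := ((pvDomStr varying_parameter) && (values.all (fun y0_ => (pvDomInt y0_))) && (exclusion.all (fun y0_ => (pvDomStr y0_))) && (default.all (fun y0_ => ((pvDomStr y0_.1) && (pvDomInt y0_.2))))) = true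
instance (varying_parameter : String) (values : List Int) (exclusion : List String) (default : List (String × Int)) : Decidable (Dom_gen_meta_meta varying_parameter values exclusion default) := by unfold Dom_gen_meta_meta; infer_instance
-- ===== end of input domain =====

-- B resolves the template once into an ordered pair list, finds the varying slot's position once,
-- and builds each result by concatenating prefix + [(vp, x)] + suffix; A rebuilds the whole dict
-- key-by-key for every value (objective: alternative decomposition).

-- the literal dict 'met' from the Python source (shared text constant of both programs)
def pvMet : List (String × Int) :=
  [("n_clusters", 4), ("speed", 10), ("move_type", 1), ("p_i_infected", 10),
   ("p_p_infected", 5), ("p_p_i_barrier", 75), ("t_infectious", 250), ("t_removed", 100)]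

-- ===== PORT A =====
def gen_meta_meta (varying_parameter : String) (values : List Int) (exclusion : List String) (default : List (String × Int)) : List (List (String × Int)) :=
  values.foldl (fun l x =>
    l ++ [ (pvMet.foldl (fun (tmp : PySem.Dict String Int) kv =>
              if exclusion.contains kv.1 then tmp
              else if kv.1 ≠ varying_parameter then
                tmp.insert kv.1 ((PySem.Dict.mk default).getD kv.1 kv.2)
              else tmp.insert kv.1 x) PySem.Dict.empty).items ]) []

-- ===== PORT B =====
def gen_meta_meta_alt (varying_parameter : String) (values : List Int) (exclusion : List String) (default : List (String × Int)) : List (List (String × Int)) :=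
  let proto : List (String × Int) :=
    (pvMet.filter (fun kv => !(exclusion.contains kv.1))).map
      (fun kv => (kv.1, (PySem.Dict.mk default).getD kv.1 kv.2))
  let keys := proto.map (·.1)
  -- 'varying_parameter in keys' + 'keys.index(varying_parameter)' ported as one match on index?
  match PySem.List.index? keys varying_parameter with
  | some i =>
    let pre := PySem.List.slice proto none (some (i : Int))
    let suf := PySem.List.slice proto (some ((i : Int) + 1)) none
    values.map (fun x => (PySem.Dict.ofList (pre ++ [(varying_parameter, x)] ++ suf)).items)
  | none => values.map (fun _ => (PySem.Dict.ofList proto).items)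

-- ===== PRECONDITION & SPEC =====
def Spec_gen_meta_meta (varying_parameter : String) (values : List Int) (exclusion : List String) (default : List (String × Int)) (out : List (List (String × Int))) : Prop := out = gen_meta_meta_alt varying_parameter values exclusion default
instance (varying_parameter : String) (values : List Int) (exclusion : List String) (default : List (String × Int)) (out : List (List (String × Int))) : Decidable (Spec_gen_meta_meta varying_parameter values exclusion default out) := by unfold Spec_gen_meta_meta; infer_instance

-- ===== CLAIM (what is proved, stated in full; the proofs are below) =====
def Claim_equal_gen_meta_meta : Prop := ∀ (varying_parameter : String) (values : List Int) (exclusion : List String) (default : List (String × Int)), Dom_gen_meta_meta varying_parameter values exclusion default → Spec_gen_meta_meta varying_parameter values exclusion default (gen_meta_meta varying_parameter values exclusion default)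

-- ===== LEMMAS AND PROOFS =====

-- the common shape both programs produce for one value x
def pvRow (varying_parameter : String) (exclusion : List String) (default : List (String × Int)) (x : Int) : List (String × Int) :=
  (pvMet.filter (fun kv => !(exclusion.contains kv.1))).map
    (fun kv => (kv.1, if kv.1 = varying_parameter then x else (PySem.Dict.mk default).getD kv.1 kv.2))

theorem pv_foldl_append (f : Int → List (String × Int)) (values : List Int) (acc : List (List (String × Int))) :
    values.foldl (fun l x => l ++ [f x]) acc = acc ++ values.map f := by
  induction values generalizing acc with
  | nil => simp
  | cons y ys ih => simp [List.foldl, ih]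

-- A's inner loop over a fresh-keyed met list appends exactly the filtered/updated rows
theorem pvA_inner (vp : String) (exclusion : List String) (default : List (String × Int)) (x : Int)
    (met : List (String × Int)) (tmp : PySem.Dict String Int)
    (hfresh : ∀ kv ∈ met, tmp.contains kv.1 = false) (hnd : (met.map (·.1)).Nodup) :
    (met.foldl (fun (tmp : PySem.Dict String Int) kv =>
        if exclusion.contains kv.1 then tmp
        else if kv.1 ≠ vp then tmp.insert kv.1 ((PySem.Dict.mk default).getD kv.1 kv.2)
        else tmp.insert kv.1 x) tmp).items
      = tmp.items ++ (met.filter (fun kv => !(exclusion.contains kv.1))).map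
          (fun kv => (kv.1, if kv.1 = vp then x else (PySem.Dict.mk default).getD kv.1 kv.2)) := by
  induction met generalizing tmp with
  | nil => simp
  | cons kv rest ih =>
    simp only [List.map_cons, List.nodup_cons] at hnd
    have hkv : tmp.contains kv.1 = false := hfresh kv (List.mem_cons_self ..)
    by_cases hex : exclusion.contains kv.1 = true
    · simp only [List.foldl_cons, hex, if_true, List.filter_cons, Bool.not_true]
      rw [ih tmp (fun p hp => hfresh p (List.mem_cons_of_mem _ hp)) hnd.2]
      simp
    · have hfresh' : ∀ p ∈ rest, (tmp.insert kv.1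
          (if kv.1 = vp then x else (PySem.Dict.mk default).getD kv.1 kv.2)).contains p.1 = false := by
        intro p hp
        rw [PySem.Dict.contains_insert]
        have h1 : tmp.contains p.1 = false := hfresh p (List.mem_cons_of_mem _ hp)
        have h2 : p.1 ≠ kv.1 := by
          intro h; exact hnd.1 (h ▸ List.mem_map_of_mem hp)
        simp [h1, h2]
      have hone : (if kv.1 ≠ vp then tmp.insert kv.1 ((PySem.Dict.mk default).getD kv.1 kv.2)
            else tmp.insert kv.1 x)
          = tmp.insert kv.1 (if kv.1 = vp then x else (PySem.Dict.mk default).getD kv.1 kv.2) := by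
        by_cases h : kv.1 = vp <;> simp [h]
      have hex' : kv.1 ∉ exclusion := by simpa using hex
      rw [List.foldl_cons, if_neg hex, hone, ih _ hfresh' hnd.2, PySem.Dict.items_insert]
      simp [hkv, hex']

-- A equals the row list
theorem pvA_eq (vp : String) (values : List Int) (exclusion : List String) (default : List (String × Int)) :
    gen_meta_meta vp values exclusion default = values.map (pvRow vp exclusion default) := by
  unfold gen_meta_meta
  rw [pv_foldl_append]
  simp only [List.nil_append]
  apply List.map_congr_left
  intro x _
  rw [pvA_inner vp exclusion default x pvMet PySem.Dict.empty
      (fun kv _ => PySem.Dict.contains_empty _) (by decide)]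
  simp [pvRow, PySem.Dict.empty]

-- dict over pairs with distinct keys keeps the list as its items
theorem pv_items_ofList_nodup (l : List (String × Int)) (h : (l.map (·.1)).Nodup) :
    (PySem.Dict.ofList l).items = l := by
  have := PySem.Dict.items_foldl_insert_fresh (l := l) (k := Prod.fst) (v := Prod.snd)
      (d := PySem.Dict.empty) (by intro a _; exact PySem.Dict.contains_empty _) h
  simpa [PySem.Dict.ofList, PySem.Dict.empty] using this

-- mapping the patch function over a list without the varying key is the identity
theorem pv_map_id_of_not_mem (vp : String) (x : Int) (l : List (String × Int))
    (h : vp ∉ l.map (·.1)) :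
    l.map (fun kv => (kv.1, if kv.1 = vp then x else kv.2)) = l := by
  induction l with
  | nil => rfl
  | cons kv t ih =>
    simp only [List.map_cons, List.mem_cons, not_or] at h
    have : kv.1 ≠ vp := fun hh => h.1 hh.symm
    simp [this, ih h.2]

-- positional surgery at the first occurrence of the varying key = elementwise patch
theorem pv_patch_eq (vp : String) (x : Int) (l : List (String × Int))
    (hnd : (l.map (·.1)).Nodup) (i : Nat)
    (hidx : PySem.List.index? (l.map (·.1)) vp = some i) :
    l.map (fun kv => (kv.1, if kv.1 = vp then x else kv.2))
      = l.take i ++ [(vp, x)] ++ l.drop (i + 1) := by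
  induction l generalizing i with
  | nil => simp [PySem.List.index?] at hidx
  | cons kv t ih =>
    simp only [List.map_cons, List.nodup_cons] at hnd
    by_cases hk : kv.1 = vp
    · rw [List.map_cons, hk, PySem.List.index?_cons_self] at hidx
      cases hidx
      have ht := pv_map_id_of_not_mem vp x t (hk ▸ hnd.1)
      simp [hk, ht]
    · rw [List.map_cons, PySem.List.index?_cons_of_ne _ hk] at hidx
      cases hj : PySem.List.index? (t.map (·.1)) vp with
      | none => rw [hj] at hidx; simp at hidx
      | some j =>
        rw [hj] at hidx
        simp only [Option.map_some] at hidx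
        cases hidx
        simp only [List.map_cons, List.take_succ_cons, List.drop_succ_cons, hk,
          List.cons_append, List.append_assoc]
        rw [ih hnd.2 j hj]
        simp

-- B equals the row list
theorem pvB_eq (vp : String) (values : List Int) (exclusion : List String) (default : List (String × Int)) :
    gen_meta_meta_alt vp values exclusion default = values.map (pvRow vp exclusion default) := by
  unfold gen_meta_meta_alt
  set proto : List (String × Int) :=
    (pvMet.filter (fun kv => !(exclusion.contains kv.1))).map
      (fun kv => (kv.1, (PySem.Dict.mk default).getD kv.1 kv.2)) with hproto
  have hkeys : proto.map (·.1) = (pvMet.filter (fun kv => !(exclusion.contains kv.1))).map (·.1) := by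
    simp [hproto]
  have hnd : (proto.map (·.1)).Nodup := by
    rw [hkeys]
    exact List.Nodup.sublist (List.Sublist.map _ List.filter_sublist) (by decide)
  have hrow : ∀ x, pvRow vp exclusion default x
      = proto.map (fun kv => (kv.1, if kv.1 = vp then x else kv.2)) := by
    intro x
    rw [hproto, List.map_map]
    rfl
  cases hidx : PySem.List.index? (proto.map (·.1)) vp with
  | none =>
    have hnm : vp ∉ proto.map (·.1) := (PySem.List.index?_eq_none_iff ..).mp hidx
    simp only [hidx]
    apply List.map_congr_left
    intro x _
    rw [pv_items_ofList_nodup proto hnd, hrow x, pv_map_id_of_not_mem vp x proto hnm]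
  | some i =>
    simp only [hidx]
    apply List.map_congr_left
    intro x _
    rw [PySem.List.slice_to_natCast]
    have h1 : ((i : Int) + 1) = ((i + 1 : Nat) : Int) := by push_cast; ring
    rw [h1, PySem.List.slice_from_natCast]
    set row := proto.take i ++ [(vp, x)] ++ proto.drop (i + 1) with hrowdef
    have hpatch : proto.map (fun kv => (kv.1, if kv.1 = vp then x else kv.2)) = row :=
      pv_patch_eq vp x proto hnd i hidx
    have hndrow : (row.map (·.1)).Nodup := by
      rw [← hpatch, List.map_map]
      exact hnd
    rw [pv_items_ofList_nodup row hndrow, hrow x, hpatch]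

-- ===== VERDICT (by name: the statement is the Claim_ definition above) =====
theorem gen_meta_meta_spec : Claim_equal_gen_meta_meta := by
  intro vp values exclusion default _
  unfold Spec_gen_meta_meta
  rw [pvA_eq, pvB_eq]
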